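-- pv_equiv track=rewrite | github.com/kamilGie/WDI | Zestaw_3:_Tablice_o_większej_liczbie_wymiarów/119/Rozwiązania/wiki.py | Zadanie_119
-- ===== SOURCE A (Python) =====
-- def Zadanie_119(t):
--     max_len = 0
--     max_row = -1
--
--     for i in range(len(t)):
--         current_value = None
--         current_length = 0
--         max_current_len = 0
--
--         for j in range(len(t[i])):
--             if t[i][j] == current_value:
--                 current_length += 1
--             else:
--                 current_value = t[i][j]
--                 current_length = 1
--
--             if current_length > max_current_len:
--                 max_current_len = current_length
--
--         if max_current_len > max_len:
--             max_len = max_current_len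
--             max_row = i
--
--     return max_row
-- ===== SOURCE B (Python) =====
-- def _run_lengths(row):
--     # split the row into maximal chunks of equal elements; return their lengths
--     out = []
--     i = 0
--     n = len(row)
--     while i < n:
--         j = i + 1
--         while j < n and row[j] == row[i]:
--             j += 1
--         out.append(j - i)
--         i = j
--     return out
--
--
-- def _longest_run(row):
--     return max(_run_lengths(row), default=0)
--
--
-- def Zadanie_119(t):
--     runs = [_longest_run(row) for row in t]
--     best = max(runs, default=0)
--     if best == 0:
--         return -1
--     return runs.index(best)
-- ===== Notes on version B (the rewrite author's own statement) =====
-- stated objective: idiomatic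
-- what changed: Replaces A's nested current_value/current_length state machine and running argmax with a group-then-select decomposition: each row is split into maximal equal-element chunks whose lengths are maxed per row, then the first index of the overall maximum is taken (or -1 when it is 0).
import Mathlib
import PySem

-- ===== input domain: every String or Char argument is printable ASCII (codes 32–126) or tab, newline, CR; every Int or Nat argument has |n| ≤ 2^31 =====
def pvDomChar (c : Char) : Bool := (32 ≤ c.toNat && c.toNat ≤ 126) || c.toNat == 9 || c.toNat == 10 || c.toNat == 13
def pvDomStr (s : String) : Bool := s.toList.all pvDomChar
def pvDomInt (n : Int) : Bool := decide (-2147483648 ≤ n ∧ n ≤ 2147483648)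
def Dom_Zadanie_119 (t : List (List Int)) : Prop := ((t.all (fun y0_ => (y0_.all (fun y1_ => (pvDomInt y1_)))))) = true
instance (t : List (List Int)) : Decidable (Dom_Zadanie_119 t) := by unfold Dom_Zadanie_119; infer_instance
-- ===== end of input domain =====

-- B replaces A's current_value/current_length state machine and running argmax by a
-- group-then-select decomposition (per-row chunk lengths, then first index of the maximum); same cost.


-- ===== PORT A =====
-- inner loop body: state (current_value, current_length, max_current_len); current_value starts as None
def pvStepInner (s : Option Int × Int × Int) (x : Int) : Option Int × Int × Int :=
  match s with
  | (cv, cl, mcl) =>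
    if cv = some x then
      (cv, cl + 1, if cl + 1 > mcl then cl + 1 else mcl)
    else
      (some x, 1, if 1 > mcl then 1 else mcl)

-- the inner 'for j in range(len(t[i]))' loop, yielding max_current_len
def pvInnerA (row : List Int) : Int := (row.foldl pvStepInner (none, 0, 0)).2.2

-- the outer 'for i in range(len(t))' loop over the rows with counter i, state (max_len, max_row)
def pvOuterA (rows : List (List Int)) (i ml mr : Int) : Int :=
  match rows with
  | [] => mr
  | row :: rest =>
    let m := pvInnerA row
    if m > ml then pvOuterA rest (i + 1) m i else pvOuterA rest (i + 1) ml mr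

def Zadanie_119 (t : List (List Int)) : Int := pvOuterA t 0 0 (-1)

-- ===== PORT B =====
-- the inner 'while j < n and row[j] == row[i]' counter: leading elements of xs equal to v
def pvLead (v : Int) : List Int → Nat
  | [] => 0
  | x :: xs => if x = v then pvLead v xs + 1 else 0

-- _run_lengths: the outer while loop advances i to j = i + 1 + lead, i.e. recursion on the suffix
def pvRunLengths : List Int → List Int
  | [] => []
  | x :: xs => (1 + (pvLead x xs : Int)) :: pvRunLengths (xs.drop (pvLead x xs))
termination_by l => l.length
decreasing_by simp

-- _longest_run: max(..., default=0)
def pvLongest (row : List Int) : Int :=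
  match pvRunLengths row with
  | [] => 0
  | a :: l => l.foldl max a

def Zadanie_119_alt (t : List (List Int)) : Int :=
  let runs := t.map pvLongest
  let best := match runs with | [] => 0 | a :: l => l.foldl max a
  if best = 0 then -1
  else match PySem.List.index? runs best with
       | some k => (k : Int)
       | none => -1   -- unreachable: a positive best occurs in runs (Python would raise ValueError)

-- ===== PRECONDITION & SPEC =====
def Spec_Zadanie_119 (t : List (List Int)) (out : Int) : Prop := out = Zadanie_119_alt t
instance (t : List (List Int)) (out : Int) : Decidable (Spec_Zadanie_119 t out) := by unfold Spec_Zadanie_119; infer_instance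

-- ===== CLAIM (what is proved, stated in full; the proofs are below) =====
def Claim_equal_Zadanie_119 : Prop := ∀ (t : List (List Int)), Dom_Zadanie_119 t → Spec_Zadanie_119 t (Zadanie_119 t)

-- ===== LEMMAS AND PROOFS =====

-- longest run of v^c ++ xs, as a canonical recursion both sides are reduced to
def pvCanon (v : Int) (c : Int) : List Int → Int
  | [] => c
  | x :: xs => if x = v then pvCanon v (c + 1) xs else max c (pvCanon x 1 xs)

theorem pvCanon_ge (xs : List Int) : ∀ v c, c ≤ pvCanon v c xs := by
  induction xs with
  | nil => intro v c; simp [pvCanon]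
  | cons x xs ih =>
    intro v c
    simp only [pvCanon]
    split
    · exact le_trans (by omega) (ih v (c + 1))
    · exact le_max_left _ _

theorem pvFoldl_max_assoc (l : List Int) : ∀ a b, l.foldl max (max a b) = max a (l.foldl max b) := by
  induction l with
  | nil => intro a b; simp
  | cons y l ih =>
    intro a b
    simp only [List.foldl]
    rw [max_assoc, ih]

theorem pvLe_foldl_max (l : List Int) : ∀ a, a ≤ l.foldl max a := by
  induction l with
  | nil => intro a; simp
  | cons y l ih => intro a; exact le_trans (le_max_left a y) (ih _)

-- a foldl max over nonnegative entries started at the head equals the one started at 0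
theorem pvMaxD_eq (a : Int) (l : List Int) (ha : 0 ≤ a) :
    l.foldl max a = (a :: l).foldl max 0 := by
  have : max 0 a = a := by omega
  simp only [List.foldl, this]

theorem pvFoldl_max_mem (l : List Int) : ∀ a, l.foldl max a = a ∨ l.foldl max a ∈ l := by
  induction l with
  | nil => intro a; simp
  | cons y l ih =>
    intro a
    rcases ih (max a y) with h | h
    · simp only [List.foldl, h]
      rcases max_choice a y with h' | h'
      · left; exact h'
      · right; rw [h']; simp
    · right; simp [List.foldl]; right; exact h


-- A's inner fold equals the canonical recursion
theorem pvInner_fold (xs : List Int) : ∀ v c m, 1 ≤ c → c ≤ m →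
    (xs.foldl pvStepInner (some v, c, m)).2.2 = max m (pvCanon v c xs) := by
  induction xs with
  | nil =>
    intro v c m h1 h2
    simp [pvCanon, max_eq_left h2]
  | cons x xs ih =>
    intro v c m h1 h2
    simp only [List.foldl, pvStepInner, pvCanon]
    by_cases hx : x = v
    · subst hx
      simp only [if_true]
      have hstep : (if c + 1 > m then c + 1 else m) = max m (c + 1) := by
        by_cases h : c + 1 > m <;> simp [h] <;> omega
      rw [hstep, ih x (c + 1) (max m (c + 1)) (by omega) (le_max_right _ _)]
      have hge := pvCanon_ge xs x (c + 1)
      have := le_max_right m (c + 1)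
      generalize pvCanon x (c + 1) xs = p at *
      simp only [max_def]; split_ifs <;> omega
    · have hne : (some v : Option Int) ≠ some x := by
        simp only [ne_eq, Option.some.injEq]
        exact fun h => hx h.symm
      rw [if_neg hne, if_neg hx]
      have h1m : ¬ ((1 : Int) > m) := by omega
      rw [if_neg h1m, ih x 1 m (le_refl 1) (by omega)]
      have hge := pvCanon_ge xs x 1
      generalize pvCanon x 1 xs = p at *
      simp only [max_def]; split_ifs <;> omega

theorem pvInnerA_eq_canon (x : Int) (xs : List Int) : pvInnerA (x :: xs) = pvCanon x 1 xs := by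
  have h0 : pvStepInner (none, 0, 0) x = (some x, 1, 1) := by simp [pvStepInner]
  have := pvInner_fold xs x 1 1 (le_refl 1) (le_refl 1)
  have hge := pvCanon_ge xs x 1
  simp only [pvInnerA, List.foldl, h0]
  rw [this]
  omega

theorem pvRunLengths_nil : pvRunLengths [] = [] := by rw [pvRunLengths]

theorem pvRunLengths_cons (x : Int) (xs : List Int) :
    pvRunLengths (x :: xs) = (1 + (pvLead x xs : Int)) :: pvRunLengths (xs.drop (pvLead x xs)) := by
  rw [pvRunLengths]

-- B's chunk decomposition equals the canonical recursion
theorem pvCanon_eq_runs (xs : List Int) : ∀ v c,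
    pvCanon v c xs = (pvRunLengths (xs.drop (pvLead v xs))).foldl max (c + (pvLead v xs : Int)) := by
  induction xs with
  | nil => intro v c; simp [pvCanon, pvLead, pvRunLengths_nil]
  | cons x xs ih =>
    intro v c
    simp only [pvCanon, pvLead]
    by_cases hx : x = v
    · rw [if_pos hx, if_pos hx, ih v (c + 1)]
      subst hx
      simp only [List.drop_succ_cons]
      congr 1
      push_cast; ring
    · rw [if_neg hx, if_neg hx]
      simp only [Nat.cast_zero, add_zero, List.drop_zero, pvRunLengths_cons]
      rw [List.foldl_cons, ih x 1]
      rw [pvFoldl_max_assoc]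

theorem pvInnerA_eq_pvLongest (row : List Int) : pvInnerA row = pvLongest row := by
  cases row with
  | nil => simp [pvInnerA, pvLongest, pvRunLengths_nil, List.foldl]
  | cons x xs =>
    rw [pvInnerA_eq_canon]
    have := pvCanon_eq_runs xs x 1
    simp only [pvLongest, pvRunLengths_cons]
    rw [this]

theorem pvInnerA_nonneg (row : List Int) : 0 ≤ pvInnerA row := by
  cases row with
  | nil => simp [pvInnerA, List.foldl]
  | cons x xs =>
    rw [pvInnerA_eq_canon]
    exact le_trans (by omega) (pvCanon_ge xs x 1)

-- A's outer loop, abstracted to the list of per-row values (proof-only helper)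
def pvOuterR (rs : List Int) (i ml mr : Int) : Int :=
  match rs with
  | [] => mr
  | r :: rest => if r > ml then pvOuterR rest (i + 1) r i else pvOuterR rest (i + 1) ml mr

theorem pvOuterA_eq_R (rows : List (List Int)) : ∀ i ml mr,
    pvOuterA rows i ml mr = pvOuterR (rows.map pvInnerA) i ml mr := by
  induction rows with
  | nil => intro i ml mr; rfl
  | cons row rest ih =>
    intro i ml mr
    simp only [pvOuterA, pvOuterR, List.map]
    split <;> rw [ih]

-- characterization of A's outer loop: the first index of the maximum (when it beats ml)
theorem pvOuterR_char (rs : List Int) : ∀ i ml mr,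
    pvOuterR rs i ml mr =
      if rs.foldl max ml ≤ ml then mr
      else i + (((PySem.List.index? rs (rs.foldl max ml)).getD 0 : Nat) : Int) := by
  induction rs with
  | nil => intro i ml mr; simp [pvOuterR]
  | cons r rs ih =>
    intro i ml mr
    have hfle := pvLe_foldl_max rs (max ml r)
    simp only [pvOuterR, List.foldl]
    by_cases hr : r > ml
    · rw [if_pos hr, ih]
      have hmlr : max ml r = r := by omega
      rw [hmlr] at hfle ⊢
      have hnot : ¬ rs.foldl max r ≤ ml := by omega
      rw [if_neg hnot]
      by_cases hb : rs.foldl max r ≤ r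
      · have hbr : rs.foldl max r = r := le_antisymm hb hfle
        rw [if_pos hb, hbr, PySem.List.index?_cons_self]
        simp
      · rw [if_neg hb]
        have hne : r ≠ rs.foldl max r := by omega
        rw [PySem.List.index?_cons_of_ne _ hne]
        have hmem : rs.foldl max r ∈ rs := by
          rcases pvFoldl_max_mem rs r with h | h
          · omega
          · exact h
        obtain ⟨k, hk⟩ := Option.isSome_iff_exists.mp ((PySem.List.index?_isSome_iff _ _).mpr hmem)
        rw [hk]
        simp only [Option.map_some, Option.getD_some]
        push_cast; ring
    · rw [if_neg hr, ih]
      have hmlr : max ml r = ml := by omega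
      rw [hmlr] at hfle ⊢
      by_cases hb : rs.foldl max ml ≤ ml
      · rw [if_pos hb, if_pos hb]
      · rw [if_neg hb, if_neg hb]
        have hne : r ≠ rs.foldl max ml := by omega
        rw [PySem.List.index?_cons_of_ne _ hne]
        have hmem : rs.foldl max ml ∈ rs := by
          rcases pvFoldl_max_mem rs ml with h | h
          · omega
          · exact h
        obtain ⟨k, hk⟩ := Option.isSome_iff_exists.mp ((PySem.List.index?_isSome_iff _ _).mpr hmem)
        rw [hk]
        simp only [Option.map_some, Option.getD_some]
        push_cast; ring

-- B's port, characterized in the same shape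
theorem pvLongest_nonneg (r : Int) (t : List (List Int)) (h : r ∈ t.map pvLongest) : 0 ≤ r := by
  obtain ⟨row, _, rfl⟩ := List.mem_map.mp h
  rw [← pvInnerA_eq_pvLongest]
  exact pvInnerA_nonneg row

theorem pvAlt_char (t : List (List Int)) :
    Zadanie_119_alt t =
      if (t.map pvLongest).foldl max 0 ≤ 0 then -1
      else (((PySem.List.index? (t.map pvLongest) ((t.map pvLongest).foldl max 0)).getD 0 : Nat) : Int) := by
  unfold Zadanie_119_alt
  cases h : t.map pvLongest with
  | nil => simp
  | cons a l =>
    have ha : 0 ≤ a := pvLongest_nonneg a t (by rw [h]; simp)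
    simp only []
    rw [pvMaxD_eq a l ha]
    have hb0 : 0 ≤ (a :: l).foldl max 0 := pvLe_foldl_max _ _
    by_cases hz : (a :: l).foldl max 0 = 0
    · rw [if_pos hz, if_pos (by omega)]
    · rw [if_neg hz, if_neg (by omega)]
      have hmem : (a :: l).foldl max 0 ∈ a :: l := by
        rcases pvFoldl_max_mem (a :: l) 0 with h' | h'
        · omega
        · exact h'
      obtain ⟨k, hk⟩ := Option.isSome_iff_exists.mp ((PySem.List.index?_isSome_iff _ _).mpr hmem)
      rw [hk]
      simp

-- ===== VERDICT (by name: the statement is the Claim_ definition above) =====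
theorem Zadanie_119_spec : Claim_equal_Zadanie_119 := by
  intro t _
  unfold Spec_Zadanie_119 Zadanie_119
  rw [pvOuterA_eq_R, pvOuterR_char]
  have hmap : t.map pvInnerA = t.map pvLongest :=
    List.map_congr_left (fun r _ => pvInnerA_eq_pvLongest r)
  rw [hmap, pvAlt_char t]
  simp only [zero_add]
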